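-- pv_equiv track=rewrite | github.com/akvanaparthy/Docling | mani_enricher.py | _parse_structured
-- ===== SOURCE A (Python) =====
-- from typing import Any, Dict, List, Optional, Tuple
--
-- _SECTION_KEYS = {"PURPOSE", "COMPONENTS", "VALUES", "DESCRIPTION",
--                  "KEY_ITEMS", "SUMMARY", "MARKDOWN"}
--
-- def _parse_structured(text: str) -> Dict[str, str]:
--     """
--     Generic parser for structured Gemini responses.
--
--     Handles multi-line sections like::
--
--         PURPOSE: One sentence.
--         COMPONENTS: part1, part2, AC.24.263
--         VALUES: None
--         DESCRIPTION: Two or three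
--           sentences here.
--
--     Returns a dict keyed by section label (uppercase), values stripped.
--     Falls back to ``{"DESCRIPTION": full_text}`` if no known keys found.
--     """
--     result: Dict[str, str] = {}
--     current: Optional[str] = None
--     buf: List[str] = []
--
--     for line in text.splitlines():
--         # detect a new labelled section ("KEY: ...")
--         matched_key = None
--         for key in _SECTION_KEYS:
--             if line.startswith(f"{key}:"):
--                 matched_key = key
--                 break
--
--         if matched_key:
--             if current is not None:
--                 result[current] = "\n".join(buf).strip()
--             current = matched_key
--             buf = [line[len(matched_key) + 1:].strip()]
--         else:
--             buf.append(line)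
--
--     if current is not None:
--         result[current] = "\n".join(buf).strip()
--
--     # fallback
--     if not result:
--         result["DESCRIPTION"] = text.strip()
--
--     return result
-- ===== SOURCE B (Python) =====
-- _SECTION_KEYS = {"PURPOSE", "COMPONENTS", "VALUES", "DESCRIPTION",
--                  "KEY_ITEMS", "SUMMARY", "MARKDOWN"}
--
-- def _match_key(line):
--     for key in _SECTION_KEYS:
--         if line.startswith(key + ":"):
--             return key
--     return None
--
-- def _parse_structured(text):
--     # Walk the lines BACK TO FRONT: accumulate trailing lines until a header
--     # is met, at which point a complete section is emitted; no flush state.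
--     sections = []
--     tail = []
--     for line in reversed(text.splitlines()):
--         key = _match_key(line)
--         if key is None:
--             tail.append(line)
--         else:
--             value = "\n".join([line[len(key) + 1:].strip()] + tail[::-1]).strip()
--             sections.append((key, value))
--             tail = []
--     if not sections:
--         return {"DESCRIPTION": text.strip()}
--     result = {}
--     for key, value in reversed(sections):
--         result[key] = value
--     return result
-- ===== Notes on version B (the rewrite author's own statement) =====
-- stated objective: alternative
-- what changed: A scans forward keeping a current-key/buffer state and flushing it at each new header and at EOF; B walks the lines back to front, accumulating trailing lines and emitting each complete section the moment its header line is met, so there is no flush state at all.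
import Mathlib
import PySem

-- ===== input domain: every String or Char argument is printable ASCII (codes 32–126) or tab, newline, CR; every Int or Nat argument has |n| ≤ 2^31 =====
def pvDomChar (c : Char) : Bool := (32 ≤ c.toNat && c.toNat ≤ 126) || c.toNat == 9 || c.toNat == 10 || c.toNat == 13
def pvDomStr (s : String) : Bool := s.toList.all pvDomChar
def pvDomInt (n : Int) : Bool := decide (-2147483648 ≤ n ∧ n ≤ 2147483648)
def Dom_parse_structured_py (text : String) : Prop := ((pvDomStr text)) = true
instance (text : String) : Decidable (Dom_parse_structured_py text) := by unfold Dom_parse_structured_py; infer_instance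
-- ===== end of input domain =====

-- B walks the lines back to front, emitting each complete section when its header is met
-- (no current/buffer flush state); same return value as A (objective: alternative decomposition).

-- shared module constant: _SECTION_KEYS (a line can match at most one "KEY:" prefix,
-- so the Python set's iteration order is irrelevant)
def pvSectionKeys : List (List Char) :=
  ["PURPOSE".toList, "COMPONENTS".toList, "VALUES".toList, "DESCRIPTION".toList,
   "KEY_ITEMS".toList, "SUMMARY".toList, "MARKDOWN".toList]

-- the inner 'for key in _SECTION_KEYS: if line.startswith(key+":"): … break' loop
def pvMatchKey (line : List Char) : Option (List Char) :=
  pvSectionKeys.find? (fun k => PySem.Chars.startswith line (k ++ [':']))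

-- ===== PORT A =====
-- loop body of A: state = (result dict, current, buf)
def pvStepA (st : PySem.Dict (List Char) (List Char) × Option (List Char) × List (List Char))
    (line : List Char) :
    PySem.Dict (List Char) (List Char) × Option (List Char) × List (List Char) :=
  match pvMatchKey line with
  | some k =>
      ((match st.2.1 with
        | some c => st.1.insert c (PySem.Chars.strip (PySem.Chars.join ['\n'] st.2.2))
        | none => st.1),
       some k,
       [PySem.Chars.strip (PySem.Chars.slice line (some ((k.length : Int) + 1)) none)])
  | none => (st.1, st.2.1, st.2.2 ++ [line])

def parse_structured_py (text : String) : List (String × String) :=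
  let st := (PySem.Chars.splitlines text.toList).foldl pvStepA (⟨[]⟩, none, [])
  let res :=
    match st.2.1 with
    | some c => st.1.insert c (PySem.Chars.strip (PySem.Chars.join ['\n'] st.2.2))
    | none => st.1
  let res :=
    if res.items = [] then res.insert "DESCRIPTION".toList (PySem.Chars.strip text.toList)
    else res
  res.items.map (fun p => (String.ofList p.1, String.ofList p.2))

-- ===== PORT B =====
-- loop body of B (lines traversed in reverse): state = (sections, tail)
def pvStepB (st : List ((List Char) × (List Char)) × List (List Char)) (line : List Char) :
    List ((List Char) × (List Char)) × List (List Char) :=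
  match pvMatchKey line with
  | none => (st.1, st.2 ++ [line])
  | some k =>
      (st.1 ++ [(k, PySem.Chars.strip (PySem.Chars.join ['\n']
         (PySem.Chars.strip (PySem.Chars.slice line (some ((k.length : Int) + 1)) none)
           :: st.2.reverse)))],
       [])

def parse_structured_py_alt (text : String) : List (String × String) :=
  let lines := PySem.Chars.splitlines text.toList
  let st := lines.reverse.foldl pvStepB ([], [])
  if st.1 = [] then [("DESCRIPTION", String.ofList (PySem.Chars.strip text.toList))]
  else
    (st.1.reverse.foldl
      (fun (d : PySem.Dict (List Char) (List Char)) p => d.insert p.1 p.2) ⟨[]⟩).items.map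
      (fun p => (String.ofList p.1, String.ofList p.2))

-- ===== PRECONDITION & SPEC =====
def Spec_parse_structured_py (text : String) (out : List (String × String)) : Prop := out = parse_structured_py_alt text
instance (text : String) (out : List (String × String)) : Decidable (Spec_parse_structured_py text out) := by unfold Spec_parse_structured_py; infer_instance

-- ===== CLAIM (what is proved, stated in full; the proofs are below) =====
def Claim_equal_parse_structured_py : Prop := ∀ (text : String), Dom_parse_structured_py text → Spec_parse_structured_py text (parse_structured_py text)

-- ===== LEMMAS AND PROOFS =====

-- abbreviations for the proofs
def pvHdrFree (x : List Char) : Bool := (pvMatchKey x).isNone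

def pvVal (l : List Char) (k : List Char) (seg : List (List Char)) : List Char :=
  PySem.Chars.strip (PySem.Chars.join ['\n']
    (PySem.Chars.strip (PySem.Chars.slice l (some ((k.length : Int) + 1)) none) :: seg))

-- the common specification: the labelled sections of a line list, in text order
def pvGroups : List (List Char) → List ((List Char) × (List Char))
  | [] => []
  | l :: ls =>
    match pvMatchKey l with
    | some k => (k, pvVal l k (ls.takeWhile pvHdrFree)) :: pvGroups (ls.dropWhile pvHdrFree)
    | none => pvGroups ls
termination_by ls => ls.length
decreasing_by
  · exact Nat.lt_succ_of_le (List.length_dropWhile_le _ _)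
  · exact Nat.lt_succ_self _

def pvIns (d : PySem.Dict (List Char) (List Char)) (p : (List Char) × (List Char)) :
    PySem.Dict (List Char) (List Char) := d.insert p.1 p.2

def pvFlush (st : PySem.Dict (List Char) (List Char) × Option (List Char) × List (List Char)) :
    PySem.Dict (List Char) (List Char) :=
  match st.2.1 with
  | some c => st.1.insert c (PySem.Chars.strip (PySem.Chars.join ['\n'] st.2.2))
  | none => st.1

lemma pvGroups_dropWhile (ls : List (List Char)) :
    pvGroups (ls.dropWhile pvHdrFree) = pvGroups ls := by
  induction ls with
  | nil => rfl
  | cons l ls ih =>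
    by_cases h : pvHdrFree l
    · rw [List.dropWhile_cons_of_pos h]
      unfold pvHdrFree at h
      rw [Option.isNone_iff_eq_none] at h
      rw [ih]
      conv_rhs => rw [pvGroups]
      rw [h]
    · rw [List.dropWhile_cons_of_neg h]

lemma pvLemA2 (ls : List (List Char)) (d : PySem.Dict (List Char) (List Char))
    (c : List Char) (b : List (List Char)) :
    pvFlush (ls.foldl pvStepA (d, some c, b)) =
      (pvGroups (ls.dropWhile pvHdrFree)).foldl pvIns
        (d.insert c (PySem.Chars.strip (PySem.Chars.join ['\n'] (b ++ ls.takeWhile pvHdrFree)))) := by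
  induction ls generalizing d c b with
  | nil => simp [pvFlush, pvGroups]
  | cons l ls ih =>
    rcases hm : pvMatchKey l with _ | k
    · have hP : pvHdrFree l := by simp [pvHdrFree, hm]
      rw [List.foldl_cons]
      have hstep : pvStepA (d, some c, b) l = (d, some c, b ++ [l]) := by
        simp [pvStepA, hm]
      rw [hstep, ih, List.dropWhile_cons_of_pos hP, List.takeWhile_cons_of_pos hP]
      simp
    · have hP : ¬ pvHdrFree l := by simp [pvHdrFree, hm]
      rw [List.foldl_cons]
      have hstep : pvStepA (d, some c, b) l =
          (d.insert c (PySem.Chars.strip (PySem.Chars.join ['\n'] b)), some k,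
           [PySem.Chars.strip (PySem.Chars.slice l (some ((k.length : Int) + 1)) none)]) := by
        simp [pvStepA, hm]
      rw [hstep, ih, List.dropWhile_cons_of_neg hP, List.takeWhile_cons_of_neg hP]
      conv_rhs => rw [pvGroups]
      rw [hm]
      rw [List.foldl_cons]
      simp [pvIns, pvVal]


lemma pvLemA1 (ls : List (List Char)) (d : PySem.Dict (List Char) (List Char))
    (b : List (List Char)) :
    pvFlush (ls.foldl pvStepA (d, none, b)) = (pvGroups ls).foldl pvIns d := by
  induction ls generalizing b with
  | nil => simp [pvFlush, pvGroups]
  | cons l ls ih =>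
    rcases hm : pvMatchKey l with _ | k
    · rw [List.foldl_cons]
      have hstep : pvStepA (d, none, b) l = (d, none, b ++ [l]) := by simp [pvStepA, hm]
      rw [hstep, ih]
      conv_rhs => rw [pvGroups]
      rw [hm]
    · rw [List.foldl_cons]
      have hstep : pvStepA (d, none, b) l =
          (d, some k,
           [PySem.Chars.strip (PySem.Chars.slice l (some ((k.length : Int) + 1)) none)]) := by
        simp [pvStepA, hm]
      rw [hstep, pvLemA2]
      conv_rhs => rw [pvGroups]
      rw [hm, List.foldl_cons]
      simp [pvIns, pvVal]

lemma pvLemB (ls : List (List Char)) :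
    ls.reverse.foldl pvStepB ([], []) =
      ((pvGroups ls).reverse, (ls.takeWhile pvHdrFree).reverse) := by
  induction ls with
  | nil => simp [pvGroups]
  | cons l ls ih =>
    rw [List.reverse_cons, List.foldl_append, ih, List.foldl_cons, List.foldl_nil]
    rcases hm : pvMatchKey l with _ | k
    · have hP : pvHdrFree l := by simp [pvHdrFree, hm]
      have hstep : pvStepB ((pvGroups ls).reverse, (ls.takeWhile pvHdrFree).reverse) l =
          ((pvGroups ls).reverse, (ls.takeWhile pvHdrFree).reverse ++ [l]) := by
        simp [pvStepB, hm]
      rw [hstep, List.takeWhile_cons_of_pos hP]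
      conv_rhs => rw [pvGroups]
      rw [hm]
      simp
    · have hP : ¬ pvHdrFree l := by simp [pvHdrFree, hm]
      have hstep : pvStepB ((pvGroups ls).reverse, (ls.takeWhile pvHdrFree).reverse) l =
          ((pvGroups ls).reverse ++ [(k, pvVal l k (ls.takeWhile pvHdrFree))], []) := by
        simp [pvStepB, hm, pvVal]
      rw [hstep, List.takeWhile_cons_of_neg hP]
      conv_rhs => rw [pvGroups]
      rw [hm]
      rw [← pvGroups_dropWhile ls]
      simp

lemma pvInsert_items_ne_nil (d : PySem.Dict (List Char) (List Char)) (k v : List Char) :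
    (d.insert k v).items ≠ [] := by
  unfold PySem.Dict.insert
  split
  · obtain ⟨items⟩ := d
    rename_i h
    simp only [PySem.Dict.contains] at h
    cases items with
    | nil => simp at h ⊢
    | cons p ps => simp
  · simp

lemma pvFoldl_pvIns_ne_nil (gs : List ((List Char) × (List Char)))
    (d : PySem.Dict (List Char) (List Char)) (hd : d.items ≠ []) :
    (gs.foldl pvIns d).items ≠ [] := by
  induction gs generalizing d with
  | nil => exact hd
  | cons g gs ih => exact ih _ (pvInsert_items_ne_nil _ _ _)

lemma pv_main (text : String) : parse_structured_py text = parse_structured_py_alt text := by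
  unfold parse_structured_py parse_structured_py_alt
  have hA := pvLemA1 (PySem.Chars.splitlines text.toList) ⟨[]⟩ []
  unfold pvFlush at hA
  simp only
  rw [hA, pvLemB, List.reverse_reverse]
  rcases hg : pvGroups (PySem.Chars.splitlines text.toList) with _ | ⟨g, gs⟩
  · simp only [List.foldl_nil]
    norm_num [PySem.Dict.insert, PySem.Dict.contains]
  · have hne : ((pvGroups (PySem.Chars.splitlines text.toList)).foldl pvIns ⟨[]⟩).items ≠ [] := by
      rw [hg, List.foldl_cons]
      exact pvFoldl_pvIns_ne_nil _ _ (pvInsert_items_ne_nil _ _ _)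
    rw [hg] at hne
    rw [if_neg hne, if_neg (by simp)]
    rfl

-- ===== VERDICT (by name: the statement is the Claim_ definition above) =====
theorem parse_structured_py_spec : Claim_equal_parse_structured_py := by
  intro text _
  unfold Spec_parse_structured_py
  exact pv_main text
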